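-- pv_equiv track=rewrite | github.com/iancontijoch/aoc2015 | day19/part2.py | _split
-- ===== SOURCE A (Python) =====
-- from string import ascii_lowercase
-- from string import ascii_uppercase
--
-- def _split(s: str) -> list[str]:
--     ret = []
--     for i, c in enumerate(s):
--         if c in ascii_lowercase:
--             continue
--         if c in ascii_uppercase and i == len(s) - 1:
--             ret.append(c)
--         elif c in ascii_uppercase and s[i+1] in ascii_lowercase:
--             ret.append(c + s[i+1])
--         else:
--             ret.append(c)
--     return ret
-- ===== SOURCE B (Python) =====
-- def _split(s: str) -> list[str]:
--     out = []
--     prev = ''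
--     for c in s:
--         if 'a' <= c <= 'z':
--             if 'A' <= prev <= 'Z':
--                 out[-1] += c
--         else:
--             out.append(c)
--         prev = c
--     return out
-- ===== Notes on version B (the rewrite author's own statement) =====
-- stated objective: alternative
-- what changed: Replaced the index-based scan with a lookahead s[i+1] by a streaming single pass that keeps only the previous character and appends a lowercase letter to the last emitted token iff the previous character was uppercase (no enumerate, no indexing).
import Mathlib
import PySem

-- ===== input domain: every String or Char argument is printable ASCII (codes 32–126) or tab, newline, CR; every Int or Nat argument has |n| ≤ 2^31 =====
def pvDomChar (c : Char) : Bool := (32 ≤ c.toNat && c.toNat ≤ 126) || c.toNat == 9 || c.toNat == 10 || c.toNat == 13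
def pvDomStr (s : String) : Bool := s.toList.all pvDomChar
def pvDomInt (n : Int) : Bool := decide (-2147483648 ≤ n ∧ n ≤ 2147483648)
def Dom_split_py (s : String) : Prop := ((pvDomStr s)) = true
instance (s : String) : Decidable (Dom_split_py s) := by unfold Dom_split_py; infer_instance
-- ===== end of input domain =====

-- B replaces A's index-and-lookahead scan by a streaming look-behind pass (append a
-- lowercase to the last token iff the previous char was uppercase); same cost, simpler.


-- ===== PORT A =====
-- `c in ascii_lowercase` / `c in ascii_uppercase`: exact as a range test on the code point
def lowC (c : Char) : Bool := 'a' ≤ c && c ≤ 'z'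
def upC (c : Char) : Bool := 'A' ≤ c && c ≤ 'Z'

-- one iteration of A's for-loop body; tokens are built as List Char and turned into
-- String by String.mk only at return (exact: String.mk is injective on char lists).
-- The lookahead s[i+1] is fetched with pyGet? first; when it is `none` Python never
-- evaluates it (short-circuit: then either i == len-1 was caught or c is not uppercase,
-- so the `and` fails on its left), and both take the final else branch.
def stepA (cs : List Char) (ret : List (List Char)) (ic : Int × Char) : List (List Char) :=
  if lowC ic.2 then ret
  else if upC ic.2 && (ic.1 == (cs.length : Int) - 1) then ret ++ [[ic.2]]
  else
    match PySem.List.pyGet? cs (ic.1 + 1) with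
    | some d => if upC ic.2 && lowC d then ret ++ [[ic.2, d]] else ret ++ [[ic.2]]
    | none => ret ++ [[ic.2]]

def split_py (s : String) : List String :=
  ((PySem.List.enumerate s.toList 0).foldl (stepA s.toList) []).map (fun t => String.ofList t)

-- ===== PORT B =====
-- out[-1] += c  (Python raises on empty out; unreachable there since prev uppercase
-- implies out is nonempty, so the [] case is junk)
def extendLast : List (List Char) → Char → List (List Char)
  | [], _ => []
  | [t], c => [t ++ [c]]
  | t :: ts, c => t :: extendLast ts c

-- prev : Option Char models B's prev string ('' ↦ none); 'A' <= '' <= 'Z' is False.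
def stepB (st : List (List Char) × Option Char) (c : Char) : List (List Char) × Option Char :=
  if lowC c then
    (if (match st.2 with | some p => upC p | none => false) then extendLast st.1 c else st.1,
     some c)
  else (st.1 ++ [[c]], some c)

def split_py_alt (s : String) : List String :=
  ((s.toList.foldl stepB ([], none)).1).map (fun t => String.ofList t)

-- ===== PRECONDITION & SPEC =====
def Spec_split_py (s : String) (out : List String) : Prop := out = split_py_alt s
instance (s : String) (out : List String) : Decidable (Spec_split_py s out) := by unfold Spec_split_py; infer_instance

-- ===== CLAIM (what is proved, stated in full; the proofs are below) =====
def Claim_equal_split_py : Prop := ∀ (s : String), Dom_split_py s → Spec_split_py s (split_py s)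

-- ===== LEMMAS AND PROOFS =====

-- common recursive characterisation of the token list
def tok : List Char → List (List Char)
  | [] => []
  | c :: rest =>
    if lowC c then tok rest
    else if upC c then
      match rest with
      | [] => [[c]]
      | d :: _ => if lowC d then [c, d] :: tok rest else [c] :: tok rest
    else [c] :: tok rest

lemma extendLast_append (xs : List (List Char)) (t : List Char) (c : Char) :
    extendLast (xs ++ [t]) c = xs ++ [t ++ [c]] := by
  induction xs with
  | nil => rfl
  | cons x xs ih =>
    cases xs with
    | nil => rfl
    | cons y ys => simpa [extendLast] using ih

lemma lemA : ∀ (suf pre : List Char) (acc : List (List Char)),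
    List.foldl (stepA (pre ++ suf)) acc (PySem.List.enumerate suf (pre.length : Int))
      = acc ++ tok suf := by
  intro suf
  induction suf with
  | nil => intro pre acc; simp [PySem.List.enumerate_nil, tok]
  | cons c rest ih =>
    intro pre acc
    rw [PySem.List.enumerate_cons, List.foldl_cons]
    have hcs : pre ++ c :: rest = (pre ++ [c]) ++ rest := by simp
    have hlen : (pre.length : Int) + 1 = (((pre ++ [c]).length : Nat) : Int) := by
      simp
    have hget : PySem.List.pyGet? (pre ++ c :: rest) ((pre.length : Int) + 1)
        = rest[0]? := by
      have : (pre.length : Int) + 1 = ((pre.length + 1 : Nat) : Int) := by push_cast; ring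
      rw [this, PySem.List.pyGet?_natCast]
      simp [List.getElem?_append_right]
    have ihx := fun acc' => (hcs ▸ hlen ▸ ih (pre ++ [c]) acc')
    cases rest with
    | nil =>
      by_cases hl : lowC c
      · simp [stepA, hl, PySem.List.enumerate_nil, tok]
      · by_cases hu : upC c
        · simp [stepA, hl, hu, PySem.List.enumerate_nil, tok]
        · simp [stepA, hl, hu, hget, PySem.List.enumerate_nil, tok]
    | cons d rest' =>
      cases hl : lowC c with
      | true => simpa [stepA, hl, tok] using ihx acc
      | false =>
        cases hu : upC c with
        | true =>
          cases hld : lowC d with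
          | true =>
            have hstep : stepA (pre ++ c :: d :: rest') acc ((pre.length : Int), c)
                = acc ++ [[c, d]] := by
              simp [stepA, hl, hu, hld, hget]
              omega
            rw [hstep, ihx (acc ++ [[c, d]])]
            simp [tok, hl, hu, hld]
          | false =>
            have hstep : stepA (pre ++ c :: d :: rest') acc ((pre.length : Int), c)
                = acc ++ [[c]] := by
              simp [stepA, hl, hu, hld, hget]
            rw [hstep, ihx (acc ++ [[c]])]
            simp [tok, hl, hu, hld]
        | false =>
          have hstep : stepA (pre ++ c :: d :: rest') acc ((pre.length : Int), c)
              = acc ++ [[c]] := by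
            simp [stepA, hl, hu, hget]
          rw [hstep, ihx (acc ++ [[c]])]
          simp [tok, hl, hu]

lemma low_not_up (d : Char) (h : lowC d = true) : upC d = false := by
  simp only [lowC, Bool.and_eq_true, decide_eq_true_eq] at h
  cases hud : upC d with
  | false => rfl
  | true =>
    simp only [upC, Bool.and_eq_true, decide_eq_true_eq] at hud
    exact absurd (le_trans h.1 hud.2) (by decide)

lemma lemB : ∀ suf : List Char,
    (∀ (acc : List (List Char)) (prev : Option Char),
        (match prev with | some p => upC p | none => false) = false →
        (List.foldl stepB (acc, prev) suf).1 = acc ++ tok suf)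
    ∧ (∀ (acc : List (List Char)) (c : Char), lowC c = false → upC c = true →
        (List.foldl stepB (acc ++ [[c]], some c) suf).1 = acc ++ tok (c :: suf)) := by
  intro suf
  induction suf with
  | nil =>
    refine ⟨fun acc prev _ => by simp [tok], fun acc c hl hu => by simp [tok, hl, hu]⟩
  | cons d rest ih =>
    obtain ⟨ih1, ih2⟩ := ih
    constructor
    · intro acc prev hprev
      cases hld : lowC d with
      | true =>
        have h2 : (match (some d : Option Char) with | some p => upC p | none => false) = false :=
          low_not_up d hld
        rw [List.foldl_cons]
        simp only [stepB, hld, if_true, hprev, Bool.false_eq_true, if_false]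
        rw [ih1 acc (some d) h2]
        simp [tok, hld]
      | false =>
        cases hud : upC d with
        | true =>
          rw [List.foldl_cons]
          simp only [stepB, hld, Bool.false_eq_true, if_false]
          exact ih2 acc d hld hud
        | false =>
          rw [List.foldl_cons]
          simp only [stepB, hld, Bool.false_eq_true, if_false]
          have h2 : (match (some d : Option Char) with | some p => upC p | none => false) = false := by
            simpa using hud
          rw [ih1 (acc ++ [[d]]) (some d) h2]
          simp [tok, hld, hud]
    · intro acc c hl hu
      cases hld : lowC d with
      | true =>
        rw [List.foldl_cons]
        simp only [stepB, hld, if_true, hu, extendLast_append]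
        have h2 : (match (some d : Option Char) with | some p => upC p | none => false) = false :=
          low_not_up d hld
        rw [ih1 (acc ++ [[c] ++ [d]]) (some d) h2]
        simp [tok, hl, hu, hld]
      | false =>
        cases hud : upC d with
        | true =>
          rw [List.foldl_cons]
          simp only [stepB, hld, Bool.false_eq_true, if_false]
          have := ih2 (acc ++ [[c]]) d hld hud
          rw [List.append_assoc] at this
          rw [← List.append_assoc] at this
          rw [this]
          simp [tok, hl, hu, hld]
        | false =>
          rw [List.foldl_cons]
          simp only [stepB, hld, Bool.false_eq_true, if_false]
          have h2 : (match (some d : Option Char) with | some p => upC p | none => false) = false := by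
            simpa using hud
          have := ih1 (acc ++ ([[c]] ++ [[d]])) (some d) h2
          rw [← List.append_assoc] at this
          rw [this]
          simp [tok, hl, hu, hld, hud]

lemma coreA_eq_tok (cs : List Char) :
    List.foldl (stepA cs) [] (PySem.List.enumerate cs 0) = tok cs := by
  have := lemA cs [] []
  simpa using this

lemma coreB_eq_tok (cs : List Char) :
    (List.foldl stepB ([], none) cs).1 = tok cs := by
  simpa using (lemB cs).1 [] none rfl

-- ===== VERDICT (by name: the statement is the Claim_ definition above) =====
theorem split_py_spec : Claim_equal_split_py := by
  intro s _
  unfold Spec_split_py split_py split_py_alt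
  rw [coreA_eq_tok, coreB_eq_tok]
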